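-- pv_equiv track=rewrite | github.com/jayak0776/Accenture-Reinprep-Problems-Codes | RienPrep/P97MinimumBadness.py | minimumBadness
-- ===== SOURCE A (Python) =====
-- def minimumBadness(s):
--     li = []
--     c = 0
--     for i in s:
--         if li:
--             if li[-1] != i and i != "W":
--                 li.append(i)
--                 c += 1
--         else:
--             if i != "W":
--                 li.append(i)
--
--     return c
-- ===== SOURCE B (Python) =====
-- def minimumBadness(s):
--     t = [ch for ch in s if ch != "W"]
--     return sum(1 for a, b in zip(t, t[1:]) if a != b)
-- ===== Notes on version B (the rewrite author's own statement) =====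
-- stated objective: simpler
-- what changed: Replaces A's single stateful pass that incrementally builds a run-compressed kept-characters list with a two-stage decomposition: materialise the non-'W' subsequence, then count adjacent distinct pairs with a separate zip pass.
import Mathlib
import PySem

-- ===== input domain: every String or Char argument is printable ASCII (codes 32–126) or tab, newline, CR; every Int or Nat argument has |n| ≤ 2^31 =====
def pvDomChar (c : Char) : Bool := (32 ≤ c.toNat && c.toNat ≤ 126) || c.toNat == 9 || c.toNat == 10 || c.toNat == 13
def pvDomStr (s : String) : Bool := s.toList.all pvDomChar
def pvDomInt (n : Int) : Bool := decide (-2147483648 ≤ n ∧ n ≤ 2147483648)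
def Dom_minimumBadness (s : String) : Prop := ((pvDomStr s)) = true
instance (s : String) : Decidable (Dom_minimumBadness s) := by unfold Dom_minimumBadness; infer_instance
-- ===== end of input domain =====

-- B changes A's single stateful loop into filter-then-count-adjacent-distinct-pairs; objective: simpler.

-- ===== PORT A =====
-- A's for-loop over s, carrying the kept-characters list `li` and the counter `c`.
def minimumBadnessLoop (rest : List Char) (li : List Char) (c : Int) : Int :=
  match rest with
  | [] => c
  | i :: rest =>
    if li ≠ [] then
      if PySem.List.pyGet? li (-1) ≠ some i ∧ i ≠ 'W' then
        minimumBadnessLoop rest (li ++ [i]) (c + 1)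
      else
        minimumBadnessLoop rest li c
    else
      if i ≠ 'W' then
        minimumBadnessLoop rest (li ++ [i]) c
      else
        minimumBadnessLoop rest li c

def minimumBadness (s : String) : Int :=
  minimumBadnessLoop s.toList [] 0

-- ===== PORT B =====
def minimumBadness_alt (s : String) : Int :=
  let t := s.toList.filter (fun ch => ch ≠ 'W')
  ((t.zip (t.drop 1)).filter (fun p => p.1 ≠ p.2)).length

-- ===== PRECONDITION & SPEC =====
def Spec_minimumBadness (s : String) (out : Int) : Prop := out = minimumBadness_alt s
instance (s : String) (out : Int) : Decidable (Spec_minimumBadness s out) := by unfold Spec_minimumBadness; infer_instance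

-- ===== CLAIM (what is proved, stated in full; the proofs are below) =====
def Claim_equal_minimumBadness : Prop := ∀ (s : String), Dom_minimumBadness s → Spec_minimumBadness s (minimumBadness s)

-- ===== LEMMAS AND PROOFS =====

-- number of adjacent distinct pairs of a :: t, head passed separately
def cntAdj (a : Char) (t : List Char) : Int :=
  match t with
  | [] => 0
  | b :: t => (if a ≠ b then 1 else 0) + cntAdj b t

theorem zip_count_eq_cntAdj (a : Char) (t : List Char) :
    ((((a :: t).zip t).filter (fun p => p.1 ≠ p.2)).length : Int) = cntAdj a t := by
  induction t generalizing a with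
  | nil => simp [cntAdj]
  | cons b t ih =>
    simp only [List.zip_cons_cons, List.filter_cons, cntAdj]
    by_cases h : a = b
    · simp [h, ← ih b]
    · simp [h, ← ih b]
      omega

-- invariant for A's loop once li is nonempty: only li's last element matters
theorem loop_nonempty (rest : List Char) :
    ∀ (li : List Char) (a : Char) (c : Int),
      minimumBadnessLoop rest (li ++ [a]) c = c + cntAdj a (rest.filter (fun ch => ch ≠ 'W')) := by
  induction rest with
  | nil => intro li a c; simp [minimumBadnessLoop, cntAdj]
  | cons i rest ih =>
    intro li a c
    by_cases hw : i = 'W'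
    · subst hw
      simp [minimumBadnessLoop, PySem.List.pyGet?_neg_one_append_singleton, ih]
    · by_cases ha : a = i
      · subst ha
        simp [minimumBadnessLoop, PySem.List.pyGet?_neg_one_append_singleton, hw, cntAdj, ih]
      · have hne : PySem.List.pyGet? (li ++ [a]) (-1) ≠ some i := by
          rw [PySem.List.pyGet?_neg_one_append_singleton]
          simp [ha]
        simp only [minimumBadnessLoop, List.filter_cons]
        rw [if_pos (by simp), if_pos ⟨hne, hw⟩]
        rw [show li ++ [a] ++ [i] = (li ++ [a]) ++ [i] from rfl, ih (li ++ [a]) i (c + 1),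
          if_pos (by simpa using hw)]
        simp only [cntAdj, if_pos (show a ≠ i from ha)]
        omega

theorem loop_empty (rest : List Char) (c : Int) :
    minimumBadnessLoop rest [] c =
      c + match rest.filter (fun ch => ch ≠ 'W') with
          | [] => 0
          | a :: t => cntAdj a t := by
  induction rest generalizing c with
  | nil => simp [minimumBadnessLoop]
  | cons i rest ih =>
    by_cases hw : i = 'W'
    · subst hw; simpa [minimumBadnessLoop] using ih c
    · simp only [minimumBadnessLoop, List.filter_cons]
      rw [if_neg (by simp), if_pos hw]
      have := loop_nonempty rest [] i c
      simpa [hw] using this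

-- ===== VERDICT (by name: the statement is the Claim_ definition above) =====
theorem minimumBadness_spec : Claim_equal_minimumBadness := by
  intro s _
  unfold Spec_minimumBadness minimumBadness minimumBadness_alt
  rw [loop_empty]
  cases h : s.toList.filter (fun ch => ch ≠ 'W') with
  | nil => simp
  | cons a t => simp [← zip_count_eq_cntAdj]
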